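-- pv_equiv track=rewrite | github.com/antonpictures/ANTON-SIFTA | .simulation_publicpush_sandbox/System/tab_heartbeat.py | _auto_tag
-- ===== SOURCE A (Python) =====
-- def _auto_tag(text: str) -> list:
--     text = text.lower()
--     tags = []
--     if any(w in text for w in ["shirt","color","wearing","clothes"]): tags.append("clothing")
--     if any(w in text for w in ["number","six","count","digit"]):       tags.append("numbers")
--     if any(w in text for w in ["memory","remember","recall"]):         tags.append("memory")
--     if any(w in text for w in ["sifta","swarm","swimmer","stgm"]):     tags.append("sifta")
--     return tags or ["general"]
-- ===== SOURCE B (Python) =====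
-- # Naive multi-pattern scan: walk the text position by position, match every
-- # keyword at each position into a set of found tags, then emit canonical order.
-- _KEYWORD_TAG = [
--     ("shirt", "clothing"), ("color", "clothing"), ("wearing", "clothing"), ("clothes", "clothing"),
--     ("number", "numbers"), ("six", "numbers"), ("count", "numbers"), ("digit", "numbers"),
--     ("memory", "memory"), ("remember", "memory"), ("recall", "memory"),
--     ("sifta", "sifta"), ("swarm", "sifta"), ("swimmer", "sifta"), ("stgm", "sifta"),
-- ]
-- _TAG_ORDER = ["clothing", "numbers", "memory", "sifta"]
--
-- def _auto_tag(text: str) -> list: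
--     t = text.lower()
--     found = set()
--     for i in range(len(t)):
--         for kw, tag in _KEYWORD_TAG:
--             if t.startswith(kw, i):
--                 found.add(tag)
--     tags = [tag for tag in _TAG_ORDER if tag in found]
--     return tags or ["general"]
-- ===== Notes on version B (the rewrite author's own statement) =====
-- stated objective: alternative
-- what changed: Replaces four per-category any(substring) checks with a naive multi-pattern matcher: one left-to-right scan over text positions matching a flat keyword->tag list into a set of found tags, emitted in canonical tag order; same asymptotic cost but a larger constant (pure-Python scan vs C-level 'in').
import Mathlib
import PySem

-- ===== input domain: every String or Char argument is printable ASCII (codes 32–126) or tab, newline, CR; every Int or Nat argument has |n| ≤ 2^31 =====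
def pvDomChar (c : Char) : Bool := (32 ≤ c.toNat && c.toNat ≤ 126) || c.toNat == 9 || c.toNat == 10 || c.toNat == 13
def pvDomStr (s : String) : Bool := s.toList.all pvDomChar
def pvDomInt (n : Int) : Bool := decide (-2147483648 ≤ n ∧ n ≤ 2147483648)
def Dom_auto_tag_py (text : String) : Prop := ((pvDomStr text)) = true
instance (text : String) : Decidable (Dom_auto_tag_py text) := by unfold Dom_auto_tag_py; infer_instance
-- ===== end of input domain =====

-- B replaces A's four per-category substring checks with a single position-by-position
-- scan of the text matching a flat keyword->tag list into a set (objective: alternative).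

-- ===== PORT A =====
def auto_tag_py (text : String) : List String :=
  let t := PySem.Str.lower text
  let tags : List String := []
  let tags := if ["shirt", "color", "wearing", "clothes"].any (fun w => PySem.Str.isIn w t) then tags ++ ["clothing"] else tags
  let tags := if ["number", "six", "count", "digit"].any (fun w => PySem.Str.isIn w t) then tags ++ ["numbers"] else tags
  let tags := if ["memory", "remember", "recall"].any (fun w => PySem.Str.isIn w t) then tags ++ ["memory"] else tags
  let tags := if ["sifta", "swarm", "swimmer", "stgm"].any (fun w => PySem.Str.isIn w t) then tags ++ ["sifta"] else tags
  if tags = [] then ["general"] else tags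

-- ===== PORT B =====
def kwTag : List (String × String) :=
  [("shirt", "clothing"), ("color", "clothing"), ("wearing", "clothing"), ("clothes", "clothing"),
   ("number", "numbers"), ("six", "numbers"), ("count", "numbers"), ("digit", "numbers"),
   ("memory", "memory"), ("remember", "memory"), ("recall", "memory"),
   ("sifta", "sifta"), ("swarm", "sifta"), ("swimmer", "sifta"), ("stgm", "sifta")]

def tagOrder : List String := ["clothing", "numbers", "memory", "sifta"]

-- the scan loop: for i in range(len(t)): for kw, tag in _KEYWORD_TAG: if t.startswith(kw, i): found.add(tag)
-- (t.startswith(kw, i) with 0 ≤ i < len(t) is exactly 'kw is a prefix of t[i:]')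
def foundSet (t : List Char) : PySem.Set String :=
  (List.range t.length).foldl (fun fnd i =>
    kwTag.foldl (fun fnd p =>
      if PySem.Chars.startswith (t.drop i) p.1.toList then PySem.Set.add fnd p.2 else fnd) fnd)
    PySem.Set.empty

def auto_tag_py_alt (text : String) : List String :=
  let t := (PySem.Str.lower text).toList
  let found := foundSet t
  let tags := tagOrder.filter (fun tag => PySem.Set.contains found tag)
  if tags = [] then ["general"] else tags

-- ===== PRECONDITION & SPEC =====
def Spec_auto_tag_py (text : String) (out : List String) : Prop := out = auto_tag_py_alt text
instance (text : String) (out : List String) : Decidable (Spec_auto_tag_py text out) := by unfold Spec_auto_tag_py; infer_instance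

-- ===== CLAIM (what is proved, stated in full; the proofs are below) =====
def Claim_equal_auto_tag_py : Prop := ∀ (text : String), Dom_auto_tag_py text → Spec_auto_tag_py text (auto_tag_py text)

-- ===== LEMMAS AND PROOFS =====

-- membership in a fold over a conditional Set.add
theorem mem_foldl_cond_add {α β : Type} [BEq α] [LawfulBEq α]
    (l : List β) (f : β → Bool) (g : β → α) (s : PySem.Set α) (x : α) :
    (x ∈ l.foldl (fun s b => if f b then PySem.Set.add s (g b) else s) s) ↔
      x ∈ s ∨ ∃ b ∈ l, f b = true ∧ g b = x := by
  induction l generalizing s with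
  | nil => simp
  | cons hd tl ih =>
    simp only [List.foldl_cons, ih, List.exists_mem_cons_iff]
    by_cases h : f hd
    · rw [if_pos h]
      simp only [PySem.Set.mem_add, h, true_and]
      constructor
      · rintro ((h1 | h1) | h1)
        exacts [Or.inl h1, Or.inr (Or.inl h1.symm), Or.inr (Or.inr h1)]
      · rintro (h1 | h1 | h1)
        exacts [Or.inl (Or.inl h1), Or.inl (Or.inr h1.symm), Or.inr h1]
    · rw [if_neg h]
      simp [h]

-- membership in the outer fold over positions
theorem mem_outer_fold (t : List Char) (s : PySem.Set String) (x : String) :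
    (x ∈ (List.range t.length).foldl (fun fnd i =>
        kwTag.foldl (fun fnd p =>
          if PySem.Chars.startswith (t.drop i) p.1.toList then PySem.Set.add fnd p.2 else fnd) fnd) s)
    ↔ x ∈ s ∨ ∃ i ∈ List.range t.length, ∃ p ∈ kwTag,
        PySem.Chars.startswith (t.drop i) p.1.toList = true ∧ p.2 = x := by
  induction (List.range t.length) generalizing s with
  | nil => simp
  | cons hd tl ih =>
    simp only [List.foldl_cons, ih, mem_foldl_cond_add, List.exists_mem_cons_iff]
    exact or_assoc

-- a nonempty pattern occurs somewhere iff it occurs at a position < length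
theorem exists_pos_iff_isIn (sub t : List Char) (hsub : sub ≠ []) :
    (∃ i ∈ List.range t.length, PySem.Chars.startswith (t.drop i) sub = true)
      ↔ PySem.Chars.isIn sub t = true := by
  rw [← PySem.Chars.exists_prefix_drop_iff_isIn]
  constructor
  · rintro ⟨i, _, h⟩
    exact ⟨i, (PySem.Chars.startswith_iff _ _).mp h⟩
  · rintro ⟨j, hpre⟩
    by_cases hj : j < t.length
    · exact ⟨j, List.mem_range.mpr hj, (PySem.Chars.startswith_iff _ _).mpr hpre⟩
    · exfalso
      have hnil : t.drop j = [] := List.drop_eq_nil_of_le (Nat.le_of_not_lt hj)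
      rw [hnil] at hpre
      exact hsub (List.prefix_nil.mp hpre)

-- characterisation of the scan's result: a tag is found iff one of its keywords occurs in t
theorem mem_foundSet (t : List Char) (x : String) :
    x ∈ foundSet t ↔ ∃ p ∈ kwTag, p.2 = x ∧ PySem.Chars.isIn p.1.toList t = true := by
  unfold foundSet
  rw [mem_outer_fold]
  constructor
  · rintro (h | ⟨i, hi, p, hp, hsw, hpx⟩)
    · simp [PySem.Set.empty] at h
    · have hne : p.1.toList ≠ [] := by fin_cases hp <;> decide
      exact ⟨p, hp, hpx, (exists_pos_iff_isIn _ t hne).mp ⟨i, hi, hsw⟩⟩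
  · rintro ⟨p, hp, hpx, hin⟩
    have hne : p.1.toList ≠ [] := by fin_cases hp <;> decide
    obtain ⟨i, hi, hsw⟩ := (exists_pos_iff_isIn _ t hne).mpr hin
    exact Or.inr ⟨i, hi, p, hp, hsw, hpx⟩

theorem found_clothing (t : List Char) :
    PySem.Set.contains (foundSet t) "clothing"
      = (["shirt", "color", "wearing", "clothes"].any (fun w => PySem.Chars.isIn w.toList t)) := by
  rw [Bool.eq_iff_iff, PySem.Set.contains_iff, mem_foundSet]
  simp [kwTag]

theorem found_numbers (t : List Char) :
    PySem.Set.contains (foundSet t) "numbers"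
      = (["number", "six", "count", "digit"].any (fun w => PySem.Chars.isIn w.toList t)) := by
  rw [Bool.eq_iff_iff, PySem.Set.contains_iff, mem_foundSet]
  simp [kwTag]

theorem found_memory (t : List Char) :
    PySem.Set.contains (foundSet t) "memory"
      = (["memory", "remember", "recall"].any (fun w => PySem.Chars.isIn w.toList t)) := by
  rw [Bool.eq_iff_iff, PySem.Set.contains_iff, mem_foundSet]
  simp [kwTag]

theorem found_sifta (t : List Char) :
    PySem.Set.contains (foundSet t) "sifta"
      = (["sifta", "swarm", "swimmer", "stgm"].any (fun w => PySem.Chars.isIn w.toList t)) := by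
  rw [Bool.eq_iff_iff, PySem.Set.contains_iff, mem_foundSet]
  simp [kwTag]

-- ===== VERDICT (by name: the statement is the Claim_ definition above) =====
theorem auto_tag_py_spec : Claim_equal_auto_tag_py := by
  intro text _
  unfold Spec_auto_tag_py auto_tag_py auto_tag_py_alt
  simp only [tagOrder, List.filter_cons, List.filter_nil, found_clothing, found_numbers,
    found_memory, found_sifta, PySem.Str.isIn_eq, PySem.Str.toList_lower]
  split_ifs <;> simp_all
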